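-- pv_equiv track=rewrite | github.com/pmallappa/paipy | skills/media/art/tools/GeneratePrompt.py | select_colors
-- ===== SOURCE A (Python) =====
-- from typing import Any, Literal, Optional
--
-- def select_colors(
--     essay_content: str, override: Optional[str] = None
-- ) -> list[str]:
--     if override:
--         return [c.strip() for c in override.split(",")]
--
--     content_lower = essay_content.lower()
--     if "security" in content_lower or "privacy" in content_lower:
--         return ["Vivid Purple"]
--     if "tool" in content_lower or "productivity" in content_lower:
--         return ["Bright Cyan"]
--     if "human" in content_lower or "growth" in content_lower:
--         return ["Neon Green"]
--     return ["Electric Blue"]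
-- ===== SOURCE B (Python) =====
-- # Bitmask accumulation + priority-table lookup instead of an early-return if-chain.
-- KEYWORD_BITS = [("security", 4), ("privacy", 4),
--                 ("tool", 2), ("productivity", 2),
--                 ("human", 1), ("growth", 1)]
--
-- # PRIORITY_TABLE[mask] = color of the highest-priority bit set in mask.
-- PRIORITY_TABLE = ["Electric Blue", "Neon Green", "Bright Cyan", "Bright Cyan",
--                   "Vivid Purple", "Vivid Purple", "Vivid Purple", "Vivid Purple"]
--
--
-- def select_colors(essay_content, override=None):
--     if override:
--         return [c.strip() for c in override.split(",")]
--     content_lower = essay_content.lower()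
--     code = 0
--     for keyword, bit in KEYWORD_BITS:
--         if keyword in content_lower:
--             code |= bit
--     return [PRIORITY_TABLE[code]]
-- ===== Notes on version B (the rewrite author's own statement) =====
-- stated objective: alternative
-- what changed: The early-return if-chain is replaced by a single flat pass over all six keywords that ORs priority bits into a mask, followed by one lookup in an 8-entry priority table; no branch chain and no short-circuiting remain.
import Mathlib
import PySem

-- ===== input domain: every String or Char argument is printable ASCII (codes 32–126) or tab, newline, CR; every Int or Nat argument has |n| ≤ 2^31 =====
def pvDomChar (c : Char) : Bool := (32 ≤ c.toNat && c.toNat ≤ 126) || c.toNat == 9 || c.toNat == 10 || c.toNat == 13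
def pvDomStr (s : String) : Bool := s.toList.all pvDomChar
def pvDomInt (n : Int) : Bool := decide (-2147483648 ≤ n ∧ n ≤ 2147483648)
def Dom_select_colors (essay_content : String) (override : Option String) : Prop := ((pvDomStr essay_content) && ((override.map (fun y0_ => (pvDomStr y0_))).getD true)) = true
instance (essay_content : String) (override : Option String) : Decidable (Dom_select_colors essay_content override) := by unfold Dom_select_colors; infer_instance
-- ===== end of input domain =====

-- B replaces A's early-return if-chain by a flat bitmask-accumulating pass over the six keywords plus one 8-entry priority-table lookup (alternative decomposition; same cost).

-- ===== PORT A =====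
def select_colors (essay_content : String) (override : Option String) : List String :=
  match override with
  | some s =>
    if s ≠ "" then (((PySem.Str.split? s ",").getD []).map PySem.Str.strip)
    else selectBody essay_content
  | none => selectBody essay_content
where
  selectBody (essay_content : String) : List String :=
    let content_lower := PySem.Str.lower essay_content
    if PySem.Str.isIn "security" content_lower || PySem.Str.isIn "privacy" content_lower then
      ["Vivid Purple"]
    else if PySem.Str.isIn "tool" content_lower || PySem.Str.isIn "productivity" content_lower then
      ["Bright Cyan"]
    else if PySem.Str.isIn "human" content_lower || PySem.Str.isIn "growth" content_lower then
      ["Neon Green"]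
    else
      ["Electric Blue"]

-- ===== PORT B =====
def pvKeywordBits : List (String × Int) :=
  [("security", 4), ("privacy", 4), ("tool", 2), ("productivity", 2), ("human", 1), ("growth", 1)]

def pvPriorityTable : List String :=
  ["Electric Blue", "Neon Green", "Bright Cyan", "Bright Cyan",
   "Vivid Purple", "Vivid Purple", "Vivid Purple", "Vivid Purple"]

def select_colors_alt (essay_content : String) (override : Option String) : List String :=
  match override with
  | some s =>
    if s ≠ "" then (((PySem.Str.split? s ",").getD []).map PySem.Str.strip)
    else altBody essay_content
  | none => altBody essay_content
where
  altBody (essay_content : String) : List String :=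
    let content_lower := PySem.Str.lower essay_content
    let code : Int := pvKeywordBits.foldl
      (fun code kb => if PySem.Str.isIn kb.1 content_lower then PySem.Int.bor code kb.2 else code) 0
    -- PRIORITY_TABLE[code]: code is always in 0..7, so pyGet? is always some; [] is unreachable
    match PySem.List.pyGet? pvPriorityTable code with
    | some c => [c]
    | none => []

-- ===== PRECONDITION & SPEC =====
def Spec_select_colors (essay_content : String) (override : Option String) (out : List String) : Prop := out = select_colors_alt essay_content override
instance (essay_content : String) (override : Option String) (out : List String) : Decidable (Spec_select_colors essay_content override out) := by unfold Spec_select_colors; infer_instance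

-- ===== CLAIM (what is proved, stated in full; the proofs are below) =====
def Claim_equal_select_colors : Prop := ∀ (essay_content : String) (override : Option String), Dom_select_colors essay_content override → Spec_select_colors essay_content override (select_colors essay_content override)

-- ===== LEMMAS AND PROOFS =====
theorem body_eq (e : String) : select_colors.selectBody e = select_colors_alt.altBody e := by
  unfold select_colors.selectBody select_colors_alt.altBody pvKeywordBits
  cases h1 : PySem.Str.isIn "security" (PySem.Str.lower e) <;>
  cases h2 : PySem.Str.isIn "privacy" (PySem.Str.lower e) <;>
  cases h3 : PySem.Str.isIn "tool" (PySem.Str.lower e) <;>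
  cases h4 : PySem.Str.isIn "productivity" (PySem.Str.lower e) <;>
  cases h5 : PySem.Str.isIn "human" (PySem.Str.lower e) <;>
  cases h6 : PySem.Str.isIn "growth" (PySem.Str.lower e) <;>
  simp only [List.foldl, h1, h2, h3, h4, h5, h6, if_true, Bool.or_self, Bool.or_false, Bool.or_true] <;> rfl

-- ===== VERDICT (by name: the statement is the Claim_ definition above) =====
theorem select_colors_spec : Claim_equal_select_colors := by
  intro e o _
  unfold Spec_select_colors select_colors select_colors_alt
  cases o with
  | none => exact body_eq e
  | some s =>
    by_cases h : s = "" <;> simp [h, body_eq e]
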